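-- pv_equiv track=rewrite | github.com/Flexlolo/aoc2020 | 14/task.py | addr_permute
-- ===== SOURCE A (Python) =====
-- from typing import List
-- from copy import deepcopy
--
-- def addr_permute(addr: List[str])-> List[List[str]]:
-- 	for bit in range(len(addr)):
-- 		if addr[bit] == 'X':
-- 			r = addr_permute(addr[bit + 1:])
-- 			p = [deepcopy(r), deepcopy(r)]
--
-- 			for i in range(2):
-- 				for l in p[i]:
-- 					l.insert(0, str(i))
--
-- 					if bit:
-- 						for j in range(bit):
-- 							l.insert(0, addr[bit - j - 1])
--
-- 			return p[0] + p[1]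
--
-- 	return [addr]
-- ===== SOURCE B (Python) =====
-- from typing import List
--
-- def addr_permute(addr: List[str]) -> List[List[str]]:
--     result = [[]]
--     for b in addr:
--         if b == 'X':
--             result = [p + [c] for p in result for c in '01']
--         else:
--             result = [p + [b] for p in result]
--     return result
-- ===== Notes on version B (the rewrite author's own statement) =====
-- stated objective: simpler
-- what changed: Replaced the recursive first-X search with prefix-copying and deepcopy-based doubling by a single left-to-right fold that extends a list of partial addresses bit by bit, doubling it in place at each 'X'.
import Mathlib
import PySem

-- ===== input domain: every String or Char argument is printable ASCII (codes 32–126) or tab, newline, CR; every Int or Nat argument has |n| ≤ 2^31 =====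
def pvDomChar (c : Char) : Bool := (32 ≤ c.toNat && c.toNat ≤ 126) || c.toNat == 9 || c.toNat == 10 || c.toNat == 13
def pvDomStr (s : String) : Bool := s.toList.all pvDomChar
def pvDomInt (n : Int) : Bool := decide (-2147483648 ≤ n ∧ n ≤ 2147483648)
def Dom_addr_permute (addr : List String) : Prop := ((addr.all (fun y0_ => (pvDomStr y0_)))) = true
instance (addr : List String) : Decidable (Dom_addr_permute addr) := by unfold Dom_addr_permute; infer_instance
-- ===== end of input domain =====

-- B replaces A's recursive first-X search (with deepcopy and repeated insert(0)) by a single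
-- left-to-right fold that doubles a list of partial addresses at each 'X' (objective: simpler).

-- ===== PORT A =====
-- A scans for the first 'X' (the for-loop with early return = first index where addr[bit]=='X',
-- i.e. List.findIdx?), recurses on the slice addr[bit+1:] (nonnegative in-range slice = drop),
-- and rebuilds each result as addr[0:bit] ++ [str(i)] ++ l (the insert(0,...) loops), returning
-- the i=0 block followed by the i=1 block; otherwise returns [addr].
def addr_permute (addr : List String) : List (List String) :=
  match h : addr.findIdx? (· == "X") with
  | some bit =>
      let r := addr_permute (addr.drop (bit + 1))
      (r.map (fun l => addr.take bit ++ "0" :: l)) ++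
      (r.map (fun l => addr.take bit ++ "1" :: l))
  | none => [addr]
termination_by addr.length
decreasing_by
  have hb : bit < addr.length :=
    ((List.findIdx?_eq_some_iff_findIdx_eq).mp h).1
  simp [List.length_drop]; omega

-- ===== PORT B =====
-- Source B's fold: result starts as [[]]; an 'X' bit doubles every partial (p+['0'], p+['1']),
-- any other bit is appended to every partial.
def addr_permute_alt (addr : List String) : List (List String) :=
  addr.foldl
    (fun result b =>
      if b == "X" then result.flatMap (fun p => ["0", "1"].map (fun c => p ++ [c]))
      else result.map (fun p => p ++ [b]))
    [[]]

-- ===== PRECONDITION & SPEC =====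
def Spec_addr_permute (addr : List String) (out : List (List String)) : Prop := out = addr_permute_alt addr
instance (addr : List String) (out : List (List String)) : Decidable (Spec_addr_permute addr out) := by unfold Spec_addr_permute; infer_instance

-- ===== CLAIM (what is proved, stated in full; the proofs are below) =====
def Claim_equal_addr_permute : Prop := ∀ (addr : List String), Dom_addr_permute addr → Spec_addr_permute addr (addr_permute addr)

-- ===== LEMMAS AND PROOFS =====

-- Head-recursive reference enumeration of the expansions.
def pvExp (addr : List String) : List (List String) :=
  match addr with
  | [] => [[]]
  | b :: rest =>
      if b == "X" then
        (pvExp rest).map (fun l => "0" :: l) ++ (pvExp rest).map (fun l => "1" :: l)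
      else
        (pvExp rest).map (fun l => b :: l)

-- B's fold from any accumulator: every partial gets every expansion appended, in order.
theorem foldl_eq_flatMap_pvExp (addr : List String) (acc : List (List String)) :
    addr.foldl
      (fun result b =>
        if b == "X" then result.flatMap (fun p => ["0", "1"].map (fun c => p ++ [c]))
        else result.map (fun p => p ++ [b]))
      acc = acc.flatMap (fun p => (pvExp addr).map (fun e => p ++ e)) := by
  induction addr generalizing acc with
  | nil => simp [pvExp]
  | cons b rest ih =>
      simp only [List.foldl_cons]
      rw [ih]
      by_cases hb : b = "X"
      · subst hb
        simp only [beq_self_eq_true, if_true, pvExp, List.flatMap_assoc]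
        rw [List.flatMap_def, List.flatMap_def]
        congr 1
        apply List.map_congr_left
        intro p _
        simp [List.map_map, Function.comp_def, List.append_assoc]
      · have hb' : (b == "X") = false := by simpa using hb
        simp only [hb', Bool.false_eq_true, if_false, pvExp, List.flatMap_def,
          List.map_map, Function.comp_def]
        congr 1
        apply List.map_congr_left
        intro p _
        simp [List.append_assoc]

theorem alt_eq_pvExp (addr : List String) : addr_permute_alt addr = pvExp addr := by
  unfold addr_permute_alt
  rw [foldl_eq_flatMap_pvExp]
  simp

-- A on a list whose head is not 'X' prepends the head to every expansion of the tail.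
theorem addr_permute_cons_ne (b : String) (rest : List String) (hb : ¬ b = "X") :
    addr_permute (b :: rest) = (addr_permute rest).map (fun l => b :: l) := by
  have hfind : (b :: rest).findIdx? (· == "X") =
      (rest.findIdx? (· == "X")).map (· + 1) := by
    simp [List.findIdx?_cons, hb]
  rw [addr_permute]
  conv_rhs => rw [addr_permute]
  cases h : rest.findIdx? (· == "X") with
  | none =>
      split
      · next bit heq => rw [hfind, h] at heq; simp at heq
      · simp
  | some bit =>
      split
      · next bit' heq =>
          rw [hfind, h] at heq
          simp only [Option.map_some, Option.some.injEq] at heq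
          subst heq
          simp [List.map_map, Function.comp_def, List.take_succ_cons,
            List.drop_succ_cons]
      · next heq => rw [hfind, h] at heq; simp at heq

theorem a_eq_pvExp (addr : List String) : addr_permute addr = pvExp addr := by
  induction addr with
  | nil =>
      rw [addr_permute]; simp [pvExp]
  | cons b rest ih =>
      by_cases hb : b = "X"
      · subst hb
        have hfind : (("X" : String) :: rest).findIdx? (· == "X") = some 0 := by
          simp [List.findIdx?_cons]
        rw [addr_permute]
        split
        · next bit heq =>
            rw [hfind] at heq
            simp only [Option.some.injEq] at heq
            subst heq
            simp [pvExp, ih]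
        · next heq => rw [hfind] at heq; simp at heq
      · rw [addr_permute_cons_ne b rest hb, ih]
        simp [pvExp, hb]

-- ===== VERDICT (by name: the statement is the Claim_ definition above) =====
theorem addr_permute_spec : Claim_equal_addr_permute := by
  intro addr _
  unfold Spec_addr_permute
  rw [a_eq_pvExp, alt_eq_pvExp]
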